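-- pv_equiv track=rewrite | github.com/ccyehintx/Optimization_proj | compact_mat.py | chk_mat
-- ===== SOURCE A (Python) =====
-- def chk_mat(zz):
--     # This function checks if the matrix has one row or column is all 0
--     n = len(zz)
--     m = len(zz[0])
--     cond = 'yes'
--     for i in zz:
--         if all([ v == 0. for v in i]):
--             cond = 'no'
--             break
--     for j in range(m):
--         col = []
--         for k in range(n):
--             ele = zz[k][j]
--             col.append(ele)
--         if all([ v == 0. for v in col]):
--             cond = 'no'
--     return cond
-- ===== SOURCE B (Python) =====
-- def chk_mat(zz):
--     # Coverage-index pass: one interleaved sweep marks which rows and which of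
--     # the first len(zz[0]) columns contain a nonzero entry, then check coverage.
--     n = len(zz)
--     m = len(zz[0])
--     row_nz = [False] * n
--     col_nz = [False] * m
--     for i, row in enumerate(zz):
--         for j, v in enumerate(row):
--             if v != 0:
--                 row_nz[i] = True
--                 if j < m:
--                     col_nz[j] = True
--     return 'yes' if all(row_nz) and all(col_nz) else 'no'
-- ===== Notes on version B (the rewrite author's own statement) =====
-- stated objective: faster
-- what changed: Replaces A's two staged scans (a row scan plus a column-rebuilding nested index loop) with a single interleaved coverage pass that marks boolean row_nz/col_nz index arrays at every nonzero entry and then checks all() on both arrays; avoiding the per-column list rebuild by repeated indexing gives a measured constant-factor speedup.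
import Mathlib
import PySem

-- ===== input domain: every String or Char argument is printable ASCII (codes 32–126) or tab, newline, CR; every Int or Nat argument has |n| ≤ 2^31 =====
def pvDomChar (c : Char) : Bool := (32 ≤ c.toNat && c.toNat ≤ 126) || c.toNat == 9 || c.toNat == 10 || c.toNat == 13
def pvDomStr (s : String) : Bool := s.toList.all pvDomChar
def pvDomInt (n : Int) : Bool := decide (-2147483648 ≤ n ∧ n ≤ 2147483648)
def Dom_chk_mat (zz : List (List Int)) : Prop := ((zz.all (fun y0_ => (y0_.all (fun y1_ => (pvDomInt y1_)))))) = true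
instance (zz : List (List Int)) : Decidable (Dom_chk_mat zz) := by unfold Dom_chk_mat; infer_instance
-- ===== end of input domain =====

-- B replaces A's two staged scans (row scan + column-rebuilding nested loop) with one
-- interleaved coverage pass marking row_nz/col_nz boolean arrays (measured constant-factor faster).

-- ===== PORT A =====
-- the row loop with its early break: once a row is all zero, return "no" immediately
def chkRowLoop : List (List Int) → String → String
  | [], cond => cond
  | i :: rest, cond => if i.all (fun v => v == 0) then "no" else chkRowLoop rest cond

def chk_mat (zz : List (List Int)) : String :=
  let n : Int := (zz.length : Int)
  let m : Int := ((PySem.List.pyGetD zz 0 ([] : List Int)).length : Int)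
  let cond := chkRowLoop zz "yes"
  (PySem.List.pyRange 0 m 1).foldl (fun cond j =>
    let col := (PySem.List.pyRange 0 n 1).foldl
      (fun col k => col ++ [PySem.List.pyGetD (PySem.List.pyGetD zz k ([] : List Int)) j 0]) []
    if col.all (fun v => v == 0) then "no" else cond) cond

-- ===== PORT B =====
-- inner loop: 'for j, v in enumerate(row)', marking row_nz[i] and (if j < m) col_nz[j]
def bInner (m : Nat) : List Int → Nat → Nat → List Bool × List Bool → List Bool × List Bool
  | [], _, _, st => st
  | v :: vs, i, j, st =>
      bInner m vs i (j + 1)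
        (if v != 0 then
           (st.1.set i true, if j < m then st.2.set j true else st.2)
         else st)

-- outer loop: 'for i, row in enumerate(zz)'
def bOuter (m : Nat) : List (List Int) → Nat → List Bool × List Bool → List Bool × List Bool
  | [], _, st => st
  | row :: rest, i, st => bOuter m rest (i + 1) (bInner m row i 0 st)

def chk_mat_alt (zz : List (List Int)) : String :=
  let n := zz.length
  let m := (PySem.List.pyGetD zz 0 ([] : List Int)).length
  let st := bOuter m zz 0 (List.replicate n false, List.replicate m false)
  if st.1.all (fun b => b) && st.2.all (fun b => b) then "yes" else "no"

-- ===== PRECONDITION & SPEC =====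
-- Pre_ excludes exactly the inputs where A raises IndexError: the empty list (zz[0])
-- and ragged matrices with some row shorter than the first (zz[k][j] for j < len(zz[0])).
def Pre_chk_mat (zz : List (List Int)) : Prop :=
  zz ≠ [] ∧ ∀ r ∈ zz, (zz.headD []).length ≤ r.length
instance (zz : List (List Int)) : Decidable (Pre_chk_mat zz) := by unfold Pre_chk_mat; infer_instance

def pvWitness_chk_mat : List (List Int) := [[0, 1], [2, 0]]

def Spec_chk_mat (zz : List (List Int)) (out : String) : Prop := out = chk_mat_alt zz
instance (zz : List (List Int)) (out : String) : Decidable (Spec_chk_mat zz out) := by unfold Spec_chk_mat; infer_instance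

-- ===== CLAIM (what is proved, stated in full; the proofs are below) =====
def Claim_equal_chk_mat : Prop := ∀ (zz : List (List Int)), Dom_chk_mat zz → Pre_chk_mat zz → Spec_chk_mat zz (chk_mat zz)

-- ===== LEMMAS AND PROOFS =====

-- A's row flag / column flag, as Booleans
def pvRowAllZero (zz : List (List Int)) : Bool := zz.any (fun r => r.all (fun v => v == 0))
def pvColB (zz : List (List Int)) (j : Nat) : List Int := zz.map (fun r => r.getD j 0)
def pvColAllZero (zz : List (List Int)) : Bool :=
  (List.range (zz.headD []).length).any (fun k => (pvColB zz k).all (fun v => v == 0))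

theorem pv_all_not_any {α : Type} (l : List α) (p : α → Bool) :
    l.all (fun x => !(p x)) = !(l.any p) := by
  induction l with
  | nil => rfl
  | cons a l ih => simp [List.all_cons, List.any_cons, ih, Bool.not_or]

theorem pv_any_not_all {α : Type} (l : List α) (p : α → Bool) :
    l.any (fun x => !(p x)) = !(l.all p) := by
  induction l with
  | nil => rfl
  | cons a l ih => simp [List.any_cons, List.all_cons, ih, Bool.not_and]

theorem pv_row_any_ne (row : List Int) :
    row.any (fun v => v != 0) = !(row.all (fun v => v == 0)) := by
  simpa [bne] using pv_any_not_all row (fun v => v == 0)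

theorem pv_rowLoop (zz : List (List Int)) (c : String) :
    chkRowLoop zz c = if pvRowAllZero zz then "no" else c := by
  induction zz generalizing c with
  | nil => simp [chkRowLoop, pvRowAllZero]
  | cons r rs ih =>
    simp only [chkRowLoop, pvRowAllZero, List.any_cons]
    by_cases h : r.all (fun v => v == 0) = true
    · simp [h]
    · simp only [Bool.not_eq_true] at h
      simp [h, ih, pvRowAllZero]

theorem pv_foldl_no (P : Int → Bool) (l : List Int) (c : String) :
    l.foldl (fun c j => if P j then "no" else c) c = if l.any P then "no" else c := by
  induction l generalizing c with
  | nil => simp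
  | cons a l ih =>
    simp only [List.foldl_cons, List.any_cons, ih]
    by_cases h : P a = true <;> simp [h]

-- A's value, under Pre_
theorem pv_A_eq (zz : List (List Int)) (hpre : Pre_chk_mat zz) :
    chk_mat zz = if pvColAllZero zz then "no" else if pvRowAllZero zz then "no" else "yes" := by
  obtain ⟨hne, hlen⟩ := hpre
  simp only [chk_mat]
  rw [pv_rowLoop]
  have hcol : ∀ j : Int,
      (PySem.List.pyRange 0 (zz.length : Int) 1).foldl
        (fun col k => col ++ [PySem.List.pyGetD (PySem.List.pyGetD zz k ([] : List Int)) j 0]) []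
      = zz.map (fun r => PySem.List.pyGetD r j 0) := by
    intro j
    rw [PySem.List.foldl_pyRange_zero_pyGetD' zz ([] : List Int)
      (fun col r => col ++ [PySem.List.pyGetD r j 0]) []]
    rw [PySem.List.foldl_append_singleton_eq_map]
    simp
  simp only [hcol]
  rw [pv_foldl_no (fun j => (zz.map (fun r => PySem.List.pyGetD r j 0)).all (fun v => v == 0))]
  have hany : (PySem.List.pyRange 0 ((PySem.List.pyGetD zz 0 ([] : List Int)).length : Int) 1).any
      (fun j => (zz.map (fun r => PySem.List.pyGetD r j 0)).all (fun v => v == 0))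
      = pvColAllZero zz := by
    rw [PySem.List.pyRange_one]
    simp only [Int.sub_zero]
    rw [List.any_map]
    unfold pvColAllZero pvColB
    have hm : ((PySem.List.pyGetD zz 0 ([] : List Int)).length : Int).toNat
        = (zz.headD []).length := by
      rw [PySem.List.pyGetD_zero]
      cases zz <;> simp
    rw [hm]
    apply List.any_congr rfl
    intro k
    simp only [Function.comp]
    congr 1
    apply List.map_congr_left
    intro r _
    have h0 : ((0 : Int) + (k : Int)) = ((k : Nat) : Int) := by omega
    rw [h0, PySem.List.pyGetD_natCast]
  rw [hany]

-- ----- B-side lemmas -----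

theorem getD_set_bool (c : List Bool) (j k : Nat) (b : Bool) :
    (c.set j b).getD k false = if k = j ∧ j < c.length then b else c.getD k false := by
  by_cases h1 : k = j
  · subst h1
    by_cases h2 : k < c.length <;>
      simp [List.getD_eq_getElem?_getD, h2]
  · have h1' : ¬ j = k := fun h => h1 h.symm
    simp [List.getD_eq_getElem?_getD, h1, h1']

theorem bInner_fst (m : Nat) (row : List Int) (i j : Nat) (st : List Bool × List Bool) :
    (bInner m row i j st).1 = if row.any (fun v => v != 0) then st.1.set i true else st.1 := by
  induction row generalizing j st with
  | nil => simp [bInner]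
  | cons v vs ih =>
    simp only [bInner]
    by_cases hv : (v != 0) = true
    · simp only [hv, if_true, ih, List.any_cons, Bool.true_or]
      by_cases h2 : vs.any (fun v => v != 0) = true <;> simp [h2, List.set_set]
    · simp only [Bool.not_eq_true] at hv
      simp [hv, ih, List.any_cons]

theorem bInner_snd_length (m : Nat) (row : List Int) (i j : Nat) (st : List Bool × List Bool) :
    (bInner m row i j st).2.length = st.2.length := by
  induction row generalizing j st with
  | nil => simp [bInner]
  | cons v vs ih =>
    simp only [bInner, ih]
    by_cases hv : (v != 0) = true
    · by_cases hj : j < m <;> simp [hv, hj]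
    · simp only [Bool.not_eq_true] at hv; simp [hv]

theorem bInner_snd_getD (m : Nat) (row : List Int) (i j : Nat) (st : List Bool × List Bool)
    (hc : st.2.length = m) (k : Nat) :
    (bInner m row i j st).2.getD k false
      = (st.2.getD k false ||
         (decide (j ≤ k) && decide (k - j < row.length) && decide (k < m)
           && (row.getD (k - j) 0 != 0))) := by
  induction row generalizing j st with
  | nil => simp [bInner]
  | cons v vs ih =>
    simp only [bInner]
    have hc' : (if (v != 0) = true then
        (st.1.set i true, if j < m then st.2.set j true else st.2) else st).2.length = m := by
      by_cases hv : (v != 0) = true <;> by_cases hj : j < m <;> simp [hv, hj, hc]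
    rw [ih (j + 1) _ hc']
    have hsnd : (if (v != 0) = true then
        (st.1.set i true, if j < m then st.2.set j true else st.2) else st).2
        = if (v != 0) = true ∧ j < m then st.2.set j true else st.2 := by
      by_cases hv : (v != 0) = true <;> by_cases hj : j < m <;> simp [hv, hj]
    rw [hsnd]
    rcases Nat.lt_trichotomy k j with hkj | hkj | hkj
    · -- k < j : nothing touches position k
      have e1 : (if (v != 0) = true ∧ j < m then st.2.set j true else st.2).getD k false
          = st.2.getD k false := by
        split_ifs with h
        · rw [getD_set_bool, if_neg (by rintro ⟨hh, -⟩; omega)]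
        · rfl
      have d1 : decide (j + 1 ≤ k) = false := by simp; omega
      have d2 : decide (j ≤ k) = false := by simp; omega
      rw [e1, d1, d2]
      simp only [Bool.false_and, Bool.or_false]
    · -- k = j
      subst hkj
      have e0 : (if (v != 0) = true ∧ k < m then st.2.set k true else st.2).getD k false
          = (st.2.getD k false || ((v != 0) && decide (k < m))) := by
        by_cases hv : (v != 0) = true <;> by_cases hj : k < m
        · rw [if_pos ⟨hv, hj⟩, getD_set_bool, if_pos ⟨rfl, by omega⟩]
          simp [hv, hj]
        · rw [if_neg (by tauto)]; simp [hj]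
        · rw [if_neg (by tauto)]
          simp only [Bool.not_eq_true] at hv
          simp [hv]
        · rw [if_neg (by tauto)]
          simp only [Bool.not_eq_true] at hv
          simp [hv]
      rw [e0]
      have d1 : decide (k + 1 ≤ k) = false := by simp
      rw [d1]
      simp only [Bool.false_and, Bool.or_false, Nat.sub_self, List.getD_cons_zero,
        List.length_cons]
      cases hb : st.2.getD k false <;> by_cases hj : k < m <;>
        cases hv : (v != 0) <;> simp [hj]
    · -- j < k
      have e1 : (if (v != 0) = true ∧ j < m then st.2.set j true else st.2).getD k false
          = st.2.getD k false := by
        split_ifs with h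
        · rw [getD_set_bool, if_neg (by rintro ⟨hh, -⟩; omega)]
        · rfl
      rw [e1]
      have d1 : decide (j + 1 ≤ k) = decide (j ≤ k) := by simp; omega
      have d2 : decide (k - (j + 1) < vs.length) = decide (k - j < vs.length + 1) := by
        by_cases h : k - (j+1) < vs.length
        · simp [h]; omega
        · simp [h]; omega
      have d3 : k - j = (k - (j + 1)) + 1 := by omega
      rw [d1, d2, d3]
      simp

theorem set_append_len {α : Type} (l1 l2 : List α) (b a : α) :
    (l1 ++ b :: l2).set l1.length a = l1 ++ a :: l2 := by
  induction l1 with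
  | nil => rfl
  | cons x xs ih => simp [ih]

theorem bOuter_fst (m : Nat) (zz : List (List Int)) (done : List Bool) (c : List Bool) :
    (bOuter m zz done.length (done ++ List.replicate zz.length false, c)).1
      = done ++ zz.map (fun row => row.any (fun v => v != 0)) := by
  induction zz generalizing done c with
  | nil => simp [bOuter]
  | cons row rest ih =>
    simp only [bOuter, List.length_cons, List.replicate_succ]
    have h1 : (bInner m row done.length 0
        (done ++ false :: List.replicate rest.length false, c)).1
        = (done ++ [row.any (fun v => v != 0)]) ++ List.replicate rest.length false := by
      rw [bInner_fst]
      by_cases h : row.any (fun v => v != 0) = true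
      · simp [h, set_append_len]
      · simp only [Bool.not_eq_true] at h
        simp [h]
    have hpair : bInner m row done.length 0
        (done ++ false :: List.replicate rest.length false, c)
        = ((done ++ [row.any (fun v => v != 0)]) ++ List.replicate rest.length false,
           (bInner m row done.length 0
             (done ++ false :: List.replicate rest.length false, c)).2) :=
      Prod.ext h1 rfl
    rw [hpair]
    have hlen2 : done.length + 1 = (done ++ [row.any (fun v => v != 0)]).length := by simp
    rw [hlen2, ih]
    simp

theorem bOuter_snd_getD (m : Nat) (zz : List (List Int)) (i : Nat) (st : List Bool × List Bool)
    (hc : st.2.length = m) (hlen : ∀ r ∈ zz, m ≤ r.length) (k : Nat) :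
    (bOuter m zz i st).2.getD k false
      = (st.2.getD k false ||
         (decide (k < m) && zz.any (fun row => row.getD k 0 != 0))) := by
  induction zz generalizing i st with
  | nil => simp [bOuter]
  | cons row rest ih =>
    simp only [bOuter]
    have hc1 : (bInner m row i 0 st).2.length = m := by rw [bInner_snd_length]; exact hc
    rw [ih (i + 1) _ hc1 (fun r hr => hlen r (List.mem_cons_of_mem _ hr))]
    rw [bInner_snd_getD m row i 0 st hc k]
    have hm : m ≤ row.length := hlen row List.mem_cons_self
    simp only [Nat.sub_zero, Nat.zero_le, decide_true, Bool.true_and, List.any_cons]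
    by_cases hk : k < m
    · have hkr : decide (k < row.length) = true := by simp; omega
      simp only [hkr, Bool.true_and, hk, decide_true]
      cases st.2.getD k false <;> cases h1 : (row.getD k 0 != 0) <;>
        cases h2 : rest.any (fun row => row.getD k 0 != 0) <;> simp
    · simp only [hk, decide_false, Bool.and_false, Bool.false_and, Bool.or_false]

theorem bOuter_snd_length (m : Nat) (zz : List (List Int)) (i : Nat) (st : List Bool × List Bool) :
    (bOuter m zz i st).2.length = st.2.length := by
  induction zz generalizing i st with
  | nil => simp [bOuter]
  | cons row rest ih => simp [bOuter, ih, bInner_snd_length]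

-- B's value, under Pre_
theorem pv_B_eq (zz : List (List Int)) (hpre : Pre_chk_mat zz) :
    chk_mat_alt zz = if (!pvRowAllZero zz) && (!pvColAllZero zz) then "yes" else "no" := by
  obtain ⟨hne, hlen⟩ := hpre
  simp only [chk_mat_alt]
  have hm : (PySem.List.pyGetD zz 0 ([] : List Int)).length = (zz.headD []).length := by
    rw [PySem.List.pyGetD_zero]
    cases zz <;> simp
  rw [hm]
  have hlen' : ∀ r ∈ zz, (zz.headD []).length ≤ r.length := hlen
  have h1 : (bOuter (zz.headD []).length zz 0
      (List.replicate zz.length false, List.replicate (zz.headD []).length false)).1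
      = zz.map (fun row => row.any (fun v => v != 0)) := by
    simpa using bOuter_fst (zz.headD []).length zz []
      (List.replicate (zz.headD []).length false)
  have h2len : (bOuter (zz.headD []).length zz 0
      (List.replicate zz.length false, List.replicate (zz.headD []).length false)).2.length
      = (zz.headD []).length := by
    rw [bOuter_snd_length]; simp
  have h2 : (bOuter (zz.headD []).length zz 0
      (List.replicate zz.length false, List.replicate (zz.headD []).length false)).2
      = (List.range (zz.headD []).length).map
          (fun k => zz.any (fun row => row.getD k 0 != 0)) := by
    apply List.ext_getElem
    · rw [h2len]; simp
    · intro k hk1 hk2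
      have hk : k < (zz.headD []).length := by rw [h2len] at hk1; exact hk1
      have hgd := bOuter_snd_getD (zz.headD []).length zz 0
        (List.replicate zz.length false, List.replicate (zz.headD []).length false)
        (by simp) hlen' k
      have hrep : (List.replicate (zz.headD []).length false).getD k false = false := by
        simp [List.getD_eq_getElem?_getD, List.getElem?_replicate]
        split <;> rfl
      rw [hrep, decide_eq_true hk, Bool.true_and, Bool.false_or] at hgd
      rw [List.getD_eq_getElem _ _ hk1] at hgd
      rw [hgd]
      simp
  rw [h1, h2]
  have hrows : (zz.map (fun row => row.any (fun v => v != 0))).all (fun b => b)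
      = !pvRowAllZero zz := by
    rw [List.all_map]
    unfold pvRowAllZero
    rw [← pv_all_not_any zz (fun r => r.all (fun v => v == 0))]
    apply List.all_congr rfl
    intro r
    simp only [Function.comp]
    rw [pv_row_any_ne]
  have hcols : (((List.range (zz.headD []).length).map
      (fun k => zz.any (fun row => row.getD k 0 != 0)))).all (fun b => b)
      = !pvColAllZero zz := by
    rw [List.all_map]
    unfold pvColAllZero
    rw [← pv_all_not_any (List.range (zz.headD []).length)
      (fun k => (pvColB zz k).all (fun v => v == 0))]
    apply List.all_congr rfl
    intro k
    simp only [Function.comp]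
    unfold pvColB
    rw [List.all_map]
    have := pv_any_not_all zz (fun r => ((r.getD k 0 == 0)))
    simp only [bne] at *
    exact this
  rw [hrows, hcols]

-- ===== VERDICT (by name: the statement is the Claim_ definition above) =====
theorem chk_mat_spec : Claim_equal_chk_mat := by
  intro zz _ hpre
  unfold Spec_chk_mat
  rw [pv_A_eq zz hpre, pv_B_eq zz hpre]
  cases h1 : pvRowAllZero zz <;> cases h2 : pvColAllZero zz <;> simp
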